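-- pv_equiv track=rewrite | github.com/swapnilsalvi1993/Python_Scripts | merge_DAQ_PEC_GUI.py | detect_ni_excel_datetime_column
-- ===== SOURCE A (Python) =====
-- NI_TIME_SUBSTRING = "Date/Time (Excel Format)"
--
-- def detect_ni_excel_datetime_column(columns: list[str]) -> str:
--     matches = [c for c in columns if NI_TIME_SUBSTRING.lower() in str(c).lower()]
--     if not matches:
--         raise ValueError(
--             f"Could not find NI DAQ time column containing substring: {NI_TIME_SUBSTRING!r}. "
--             f"Available columns (first 20): {columns[:20]}"
--         )
--     matches.sort(key=lambda s: (len(s), s))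
--     return matches[0]
-- ===== SOURCE B (Python) =====
-- NI_TIME_SUBSTRING = "Date/Time (Excel Format)"
--
-- def detect_ni_excel_datetime_column(columns: list[str]) -> str:
--     needle = NI_TIME_SUBSTRING.lower()
--     best = None
--     for c in columns:
--         if needle in str(c).lower():
--             if best is None or (len(c), c) < (len(best), best):
--                 best = c
--     if best is None:
--         raise ValueError(
--             f"Could not find NI DAQ time column containing substring: {NI_TIME_SUBSTRING!r}. "
--             f"Available columns (first 20): {columns[:20]}"
--         )
--     return best
-- ===== Notes on version B (the rewrite author's own statement) =====
-- stated objective: simpler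
-- what changed: Replaces the build-a-matches-list-then-stable-sort-and-take-head pipeline with one fused pass that keeps the running minimum under the key (len, value).
import Mathlib
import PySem

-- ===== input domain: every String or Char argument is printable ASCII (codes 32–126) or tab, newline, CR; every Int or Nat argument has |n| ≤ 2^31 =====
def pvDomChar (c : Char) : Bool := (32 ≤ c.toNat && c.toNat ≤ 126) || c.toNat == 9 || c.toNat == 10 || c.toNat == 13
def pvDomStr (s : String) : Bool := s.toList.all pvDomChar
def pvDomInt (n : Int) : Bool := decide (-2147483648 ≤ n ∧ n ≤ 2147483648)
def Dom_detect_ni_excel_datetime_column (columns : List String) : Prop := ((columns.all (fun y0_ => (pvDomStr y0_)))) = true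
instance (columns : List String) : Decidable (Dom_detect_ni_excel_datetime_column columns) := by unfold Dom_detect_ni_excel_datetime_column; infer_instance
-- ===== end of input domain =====

-- B fuses A's filter + stable sort + take-head into one linear pass keeping the running (len, value)-minimum; simpler decomposition, same result.

-- shared match predicate: NI_TIME_SUBSTRING.lower() in str(c).lower()
def niMatch (c : String) : Bool :=
  PySem.Str.isIn (PySem.Str.lower "Date/Time (Excel Format)") (PySem.Str.lower c)

-- ===== PORT A =====
def detect_ni_excel_datetime_column (columns : List String) : String :=
  match PySem.List.sorted2 (columns.filter (fun c => niMatch c))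
      (fun s => PySem.Str.len s) (fun s => s) with
  | [] => ""          -- Python A raises ValueError here; excluded by Pre_
  | m :: _ => m

-- ===== PORT B =====
-- (len(c), c) < (len(b), b)
def pyKeyLt (c b : String) : Bool :=
  decide (PySem.Str.len c < PySem.Str.len b) ||
    (PySem.Str.len c == PySem.Str.len b && decide (c < b))

def detect_ni_excel_datetime_column_alt (columns : List String) : String :=
  match columns.foldl (fun best c =>
      if niMatch c then
        match best with
        | none => some c
        | some b => if pyKeyLt c b then some c else some b
      else best) none with
  | none => ""        -- Python B raises the identical ValueError here; excluded by Pre_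
  | some b => b

-- ===== PRECONDITION & SPEC =====
-- Pre_ excludes exactly the inputs with no matching column, on which both Pythons raise ValueError.
def Pre_detect_ni_excel_datetime_column (columns : List String) : Prop :=
  columns.any (fun c => niMatch c) = true
instance (columns : List String) : Decidable (Pre_detect_ni_excel_datetime_column columns) := by
  unfold Pre_detect_ni_excel_datetime_column; infer_instance
def pvWitness_detect_ni_excel_datetime_column : List String := ["Date/Time (Excel Format)"]
def Spec_detect_ni_excel_datetime_column (columns : List String) (out : String) : Prop := out = detect_ni_excel_datetime_column_alt columns
instance (columns : List String) (out : String) : Decidable (Spec_detect_ni_excel_datetime_column columns out) := by unfold Spec_detect_ni_excel_datetime_column; infer_instance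

-- ===== CLAIM (what is proved, stated in full; the proofs are below) =====
def Claim_equal_detect_ni_excel_datetime_column : Prop := ∀ (columns : List String), Dom_detect_ni_excel_datetime_column columns → Pre_detect_ni_excel_datetime_column columns → Spec_detect_ni_excel_datetime_column columns (detect_ni_excel_datetime_column columns)

-- ===== LEMMAS AND PROOFS =====
theorem head_insertBy {α : Type} (before : α → α → Bool) (x : α) (acc : List α) :
    (PySem.List.insertBy before x acc).head? =
      some (match acc.head? with | none => x | some y => if before x y then x else y) := by
  cases acc with
  | nil => simp [PySem.List.insertBy]
  | cons y ys =>
      simp only [PySem.List.insertBy, List.head?_cons]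
      split <;> simp_all

theorem lt_eq_pyKeyLt (c b : String) :
    (decide (PySem.Str.len c < PySem.Str.len b) ||
      (!decide (PySem.Str.len b < PySem.Str.len c) && decide (c < b))) = pyKeyLt c b := by
  unfold pyKeyLt
  simp only [PySem.Str.len]
  by_cases hlt : (c.length : Int) < (b.length : Int)
  · simp [hlt]
  · by_cases heq : (c.length : Int) = (b.length : Int)
    · have h2 : ¬ (b.length : Int) < (c.length : Int) := by omega
      simp [heq]
    · have h2 : (b.length : Int) < (c.length : Int) := by omega
      simp [hlt, h2, heq]

-- head of A's insertion sort = B's running-minimum fold, with the accumulator generalized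
theorem head_foldl_ni :
    ∀ (l : List String) (acc : List String),
      (l.foldl (fun a x => PySem.List.insertBy
          (fun a b => decide (PySem.Str.len a < PySem.Str.len b) ||
            (!decide (PySem.Str.len b < PySem.Str.len a) && decide (a < b))) x a) acc).head? =
        l.foldl (fun best c =>
          match best with
          | none => some c
          | some b => if pyKeyLt c b then some c else some b) acc.head? := by
  intro l
  induction l with
  | nil => intro acc; rfl
  | cons x xs ih =>
      intro acc
      simp only [List.foldl_cons]
      rw [ih, head_insertBy]
      cases acc.head? with
      | none => rfl
      | some y =>
          simp only [lt_eq_pyKeyLt]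
          split <;> rfl

-- ===== VERDICT (by name: the statement is the Claim_ definition above) =====
theorem detect_ni_excel_datetime_column_spec : Claim_equal_detect_ni_excel_datetime_column := by
  intro columns _ _
  show detect_ni_excel_datetime_column columns = detect_ni_excel_datetime_column_alt columns
  unfold detect_ni_excel_datetime_column detect_ni_excel_datetime_column_alt
  rw [← List.foldl_filter]
  have hsorted :
      PySem.List.sorted2 (columns.filter (fun c => niMatch c))
          (fun s => PySem.Str.len s) (fun s => s) =
        (columns.filter (fun c => niMatch c)).foldl
          (fun acc x => PySem.List.insertBy
            (fun a b => decide (PySem.Str.len a < PySem.Str.len b) ||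
              (!decide (PySem.Str.len b < PySem.Str.len a) && decide (a < b))) x acc) [] := rfl
  rw [hsorted]
  have h := head_foldl_ni (columns.filter (fun c => niMatch c)) []
  cases hh : ((columns.filter (fun c => niMatch c)).foldl
      (fun a x => PySem.List.insertBy
        (fun a b => decide (PySem.Str.len a < PySem.Str.len b) ||
          (!decide (PySem.Str.len b < PySem.Str.len a) && decide (a < b))) x a) []) with
  | nil => rw [hh] at h; simp only [List.head?_nil] at h; rw [← h]
  | cons m t => rw [hh] at h; simp only [List.head?_cons, List.head?_nil] at h; rw [← h]
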